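-- pv_equiv track=rewrite | github.com/Lima404/Projeto_ALP_unidade3 | validacoes.py | validnum
-- ===== SOURCE A (Python) =====
-- def validnum(num):
--     numeros = '0123456789'
--     num = num.upper()
--     count = 0
--     for i in range(len(numeros)):
--         for j in range(len(num)):
--             if num[j] == numeros[i]:
--                 count+=1
--
--     if count == len(num):
--         return True
--     else:
--         return False
-- ===== SOURCE B (Python) =====
-- def validnum(num):
--     num = num.upper()
--     return all(c in '0123456789' for c in num)
-- ===== Notes on version B (the rewrite author's own statement) =====
-- stated objective: simpler
-- what changed: Replaces the 10xn nested counting loops (count matches per digit, then compare the total with len) by a single short-circuiting pass that checks each character's membership in the digit string.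
import Mathlib
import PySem

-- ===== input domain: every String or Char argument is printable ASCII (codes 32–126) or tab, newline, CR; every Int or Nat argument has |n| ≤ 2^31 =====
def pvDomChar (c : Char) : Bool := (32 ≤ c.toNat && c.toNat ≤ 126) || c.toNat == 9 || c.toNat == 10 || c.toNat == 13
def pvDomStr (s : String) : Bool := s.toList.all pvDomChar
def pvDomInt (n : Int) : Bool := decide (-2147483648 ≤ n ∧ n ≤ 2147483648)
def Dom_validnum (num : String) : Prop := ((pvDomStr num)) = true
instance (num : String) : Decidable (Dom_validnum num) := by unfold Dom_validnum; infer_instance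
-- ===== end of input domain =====

-- B replaces A's 10×n nested counting loops by a single membership pass over the characters (simpler).

-- ===== PORT A =====
def validnum (num : String) : Bool :=
  let numeros : String := "0123456789"
  let num := PySem.Str.upper num
  let count : Int :=
    (PySem.List.pyRange 0 (PySem.Str.len numeros) 1).foldl (fun count i =>
      (PySem.List.pyRange 0 (PySem.Str.len num) 1).foldl (fun count j =>
        if PySem.Str.pyGet? num j == PySem.Str.pyGet? numeros i then count + 1 else count)
        count) 0
  if count == PySem.Str.len num then true else false

-- ===== PORT B =====
def validnum_alt (num : String) : Bool :=
  let num := PySem.Str.upper num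
  num.toList.all (fun c => PySem.Chars.isIn [c] "0123456789".toList)

-- ===== PRECONDITION & SPEC =====
def Spec_validnum (num : String) (out : Bool) : Prop := out = validnum_alt num
instance (num : String) (out : Bool) : Decidable (Spec_validnum num out) := by unfold Spec_validnum; infer_instance

-- ===== CLAIM (what is proved, stated in full; the proofs are below) =====
def Claim_equal_validnum : Prop := ∀ (num : String), Dom_validnum num → Spec_validnum num (validnum num)

-- ===== LEMMAS AND PROOFS =====

-- the inner 'for j in range(len(num))' loop counts occurrences of digit d
lemma inner_loop (t : String) (d : Char) (a : Int) :
    (PySem.List.pyRange 0 (t.toList.length : Int) 1).foldl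
      (fun c j => if PySem.Str.pyGet? t j == some d then c + 1 else c) a
      = a + (t.toList.count d : Int) := by
  have hb : ∀ j ∈ PySem.List.pyRange 0 (t.toList.length : Int) 1, ∀ (c : Int),
      (if PySem.Str.pyGet? t j == some d then c + 1 else c)
        = (if PySem.List.pyGetD t.toList j ' ' == d then c + 1 else c) := by
    intro j hj c
    rw [PySem.List.mem_pyRange_one] at hj
    have hlt : j.toNat < t.toList.length := by omega
    rw [PySem.Str.pyGet?_eq, PySem.Chars.pyGet?_eq_listPyGet?]
    simp [PySem.List.pyGet?_of_nonneg t.toList hj.1, PySem.List.pyGetD,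
          List.getElem?_eq_getElem hlt]
  rw [PySem.List.foldl_congr_mem' _ _ _ _ hb]
  rw [PySem.List.foldl_pyRange_zero_pyGetD' t.toList ' ' (fun acc x => if x == d then acc + 1 else acc) a]
  rw [PySem.List.foldl_beq_add_one]

-- two Bool-countPs with incompatible predicates add up
lemma countP_or_disjoint (p q : Char → Bool) (s : List Char)
    (h : ∀ c, ¬(p c = true ∧ q c = true)) :
    s.countP (fun c => p c || q c) = s.countP p + s.countP q := by
  induction s with
  | nil => simp
  | cons c t ih =>
    by_cases hp : p c = true <;> by_cases hq : q c = true <;>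
      simp [hp, hq, ih] <;> first | omega | exact absurd ⟨hp, hq⟩ (h c)

-- summing per-digit counts over a duplicate-free digit list counts the digit characters
lemma sum_count_eq_countP (ds : List Char) (hnd : ds.Nodup) (s : List Char) :
    (ds.map (fun d => s.count d)).sum = s.countP (fun c => ds.contains c) := by
  induction ds with
  | nil => simp
  | cons d ds ih =>
    simp only [List.nodup_cons] at hnd
    have h := countP_or_disjoint (fun c => c == d) (fun c => ds.contains c) s
      (by
        rintro c ⟨h1, h2⟩
        have : c = d := by simpa using h1
        exact hnd.1 (by simpa [this] using h2))
    rw [List.map_cons, List.sum_cons, ih hnd.2]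
    have hc : ∀ c : Char, ((d :: ds).contains c) = ((c == d) || ds.contains c) := by
      intro c; rfl
    simp only [hc]
    rw [h, List.count]

-- the whole body of A (after num.upper()) equals the whole body of B, for any string t
lemma core (t : String) :
    (if ((PySem.List.pyRange 0 (PySem.Str.len "0123456789") 1).foldl (fun count i =>
          (PySem.List.pyRange 0 (PySem.Str.len t) 1).foldl (fun count j =>
            if PySem.Str.pyGet? t j == PySem.Str.pyGet? "0123456789" i then count + 1 else count)
            count) (0 : Int)) == PySem.Str.len t then true else false)
      = t.toList.all (fun c => PySem.Chars.isIn [c] "0123456789".toList) := by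
  rw [show PySem.List.pyRange 0 (PySem.Str.len "0123456789") 1
        = [0, 1, 2, 3, 4, 5, 6, 7, 8, 9] from rfl]
  simp only [List.foldl_cons, List.foldl_nil]
  simp only [show PySem.Str.pyGet? "0123456789" 0 = some '0' from rfl,
      show PySem.Str.pyGet? "0123456789" 1 = some '1' from rfl,
      show PySem.Str.pyGet? "0123456789" 2 = some '2' from rfl,
      show PySem.Str.pyGet? "0123456789" 3 = some '3' from rfl,
      show PySem.Str.pyGet? "0123456789" 4 = some '4' from rfl,
      show PySem.Str.pyGet? "0123456789" 5 = some '5' from rfl,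
      show PySem.Str.pyGet? "0123456789" 6 = some '6' from rfl,
      show PySem.Str.pyGet? "0123456789" 7 = some '7' from rfl,
      show PySem.Str.pyGet? "0123456789" 8 = some '8' from rfl,
      show PySem.Str.pyGet? "0123456789" 9 = some '9' from rfl]
  simp only [PySem.Str.len_eq]
  simp only [inner_loop]
  have hs := sum_count_eq_countP ['0', '1', '2', '3', '4', '5', '6', '7', '8', '9'] (by decide)
      t.toList
  simp only [List.map_cons, List.map_nil, List.sum_cons, List.sum_nil] at hs
  by_cases hall : ∀ c ∈ t.toList, c ∈ ['0', '1', '2', '3', '4', '5', '6', '7', '8', '9']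
  · have hN : t.toList.countP
        (fun c => (['0', '1', '2', '3', '4', '5', '6', '7', '8', '9']).contains c)
        = t.toList.length := by
      rw [List.countP_eq_length]
      intro c hc; simpa using hall c hc
    rw [hN] at hs
    have hA : ((0 : Int) + ↑(t.toList.count '0') + ↑(t.toList.count '1') + ↑(t.toList.count '2')
        + ↑(t.toList.count '3') + ↑(t.toList.count '4') + ↑(t.toList.count '5')
        + ↑(t.toList.count '6') + ↑(t.toList.count '7') + ↑(t.toList.count '8')
        + ↑(t.toList.count '9') == (t.toList.length : Int)) = true := by
      simp only [beq_iff_eq]; omega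
    rw [hA]
    have hB : t.toList.all (fun c => PySem.Chars.isIn [c] "0123456789".toList) = true := by
      rw [List.all_eq_true]
      intro c hc
      rw [PySem.Chars.isIn_iff_infix, List.singleton_infix_iff]
      simpa using hall c hc
    rw [hB]
    rfl
  · have hN : t.toList.countP
        (fun c => (['0', '1', '2', '3', '4', '5', '6', '7', '8', '9']).contains c)
        ≠ t.toList.length := by
      intro h
      exact hall (fun c hc => by simpa using List.countP_eq_length.mp h c hc)
    have hle := List.countP_le_length
      (p := fun c => (['0', '1', '2', '3', '4', '5', '6', '7', '8', '9']).contains c)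
      (l := t.toList)
    have hA : ((0 : Int) + ↑(t.toList.count '0') + ↑(t.toList.count '1') + ↑(t.toList.count '2')
        + ↑(t.toList.count '3') + ↑(t.toList.count '4') + ↑(t.toList.count '5')
        + ↑(t.toList.count '6') + ↑(t.toList.count '7') + ↑(t.toList.count '8')
        + ↑(t.toList.count '9') == (t.toList.length : Int)) = false := by
      simp only [beq_eq_false_iff_ne, ne_eq]
      omega
    rw [hA]
    have hB : t.toList.all (fun c => PySem.Chars.isIn [c] "0123456789".toList) = false := by
      rw [Bool.eq_false_iff, ne_eq, List.all_eq_true]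
      intro h
      exact hall (fun c hc => by
        have := h c hc
        rw [PySem.Chars.isIn_iff_infix, List.singleton_infix_iff] at this
        simpa using this)
    rw [hB]
    rfl

theorem validnum_spec : Claim_equal_validnum := by
  intro num _
  unfold Spec_validnum validnum validnum_alt
  exact core (PySem.Str.upper num)
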